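-- pv_equiv track=rewrite | github.com/L273/Cryptology- | 基于密码算法的服务器/大作业项目文件/备份/Client.py | get_long_key
-- ===== SOURCE A (Python) =====
-- def loop_25(num):
--     temp_low=num>>(128-25)
--     num=num<<25
--     num=num&(2**128-1)
--     return  num+temp_low
--
-- def get_long_key(key):
--     K=[]
--     while(len(key)<16):
--         key = key + " "
--     key=key[:16]
--     while(len(K)<52):
--
--         #取数据
--         for i in range(0,16,2):
--             K.append(ord(key[i])*(2**8)+ord(key[i+1]))
--
--         #循环左移25位
--         key_num=0
--         for i in key:
--             key_num = key_num*(2**8) + ord(i)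
--         key_num=loop_25(key_num)
--
--         #重构key，以便下一次循环
--         key=""
--         for i in range(1,17):
--             key = key + chr((key_num>>(128-i*8))%(2**8))
--
--     K=K[:52] #会取到56个key，所以就要截取
--
--     return K
-- ===== SOURCE B (Python) =====
-- def get_long_key(key):
--     # Keep the evolving 128-bit key as ONE integer: first 8 subkeys from the
--     # padded string, then 6 rounds of rotate-left-25 with direct 16-bit
--     # chunk extraction (no per-round string rebuild).
--     key = (key + " " * 16)[:16]
--     K = [ord(key[2 * j]) * 256 + ord(key[2 * j + 1]) for j in range(8)]
--     kn = 0
--     for ch in key: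
--         kn = kn * 256 + ord(ch)
--     for _ in range(6):
--         kn = ((kn << 25) & ((1 << 128) - 1)) + (kn >> 103)
--         K += [(kn >> (112 - 16 * j)) & 0xFFFF for j in range(8)]
--     return K[:52]
-- ===== Notes on version B (the rewrite author's own statement) =====
-- stated objective: simpler
-- what changed: B keeps the evolving key as a single 128-bit integer and extracts each round's eight 16-bit subkeys by shift/mask, deleting A's per-round char-by-char string rebuild and re-parsing (horner) loops.
import Mathlib
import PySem

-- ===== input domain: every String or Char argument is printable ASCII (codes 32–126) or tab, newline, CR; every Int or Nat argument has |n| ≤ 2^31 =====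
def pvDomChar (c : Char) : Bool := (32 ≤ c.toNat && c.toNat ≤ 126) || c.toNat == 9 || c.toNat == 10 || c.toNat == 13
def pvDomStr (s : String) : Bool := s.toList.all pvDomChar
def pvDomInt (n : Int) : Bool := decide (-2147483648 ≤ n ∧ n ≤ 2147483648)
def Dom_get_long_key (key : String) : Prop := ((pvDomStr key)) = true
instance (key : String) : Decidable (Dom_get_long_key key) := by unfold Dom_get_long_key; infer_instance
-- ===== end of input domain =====

-- B keeps the evolving key as a single 128-bit integer, extracting subkeys by
-- shift/mask instead of A's per-round string rebuild + re-parse (objective: simpler).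

-- ===== PORT A =====

-- loop_25: rotate a 128-bit value left by 25 bits.
-- `num >> 103` and `num & (2**128-1)` are ported as floordiv / mod by 2^103 / 2^128:
-- exact for the nonnegative num this function is applied to inside get_long_key.
def pvLoop25 (num : Int) : Int :=
  let temp_low := PySem.Int.floordiv num (2 ^ 103)
  let num := num * 2 ^ 25
  let num := PySem.Int.mod num (2 ^ 128)
  num + temp_low

-- while len(key) < 16: key = key + " "
def pvPadA (cs : List Char) : List Char :=
  if cs.length < 16 then pvPadA (cs ++ [' ']) else cs
termination_by 16 - cs.length
decreasing_by simp [List.length_append]; omega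

-- for i in range(0,16,2): K.append(ord(key[i])*(2**8)+ord(key[i+1]))
-- key always has length 16 here, so the pyGetD default ' ' is never used.
def pvExtractA (K : List Int) (key : List Char) : List Int :=
  (PySem.List.pyRange 0 16 2).foldl
    (fun K i => K ++ [(PySem.List.pyGetD key i ' ').toNat * 2 ^ 8
                      + ((PySem.List.pyGetD key (i + 1) ' ').toNat : Int)]) K

-- key_num = 0; for i in key: key_num = key_num*(2**8) + ord(i)
def pvHornerA (key : List Char) : Int :=
  key.foldl (fun kn c => kn * 2 ^ 8 + (c.toNat : Int)) 0

-- key = ""; for i in range(1,17): key += chr((key_num >> (128-i*8)) % (2**8))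
-- the shift is floordiv (exact: key_num ≥ 0 here); 1 ≤ i ≤ 16 so (128-8*i).toNat is exact.
def pvRebuildA (kn : Int) : List Char :=
  (PySem.List.pyRange 1 17 1).foldl
    (fun key i =>
      key ++ [Char.ofNat (PySem.Int.mod (PySem.Int.floordiv kn (2 ^ (128 - 8 * i).toNat)) (2 ^ 8)).toNat])
    []

-- lemma needed by pvLoopA's termination proof (cited in decreasing_by)
theorem pvExtractA_length (K : List Int) (key : List Char) :
    (pvExtractA K key).length = K.length + 8 := by
  have h : PySem.List.pyRange 0 16 2 = [0, 2, 4, 6, 8, 10, 12, 14] := by decide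
  simp [pvExtractA, h, List.foldl]

-- while len(K) < 52: …
def pvLoopA (K : List Int) (key : List Char) : List Int :=
  if K.length < 52 then
    let K' := pvExtractA K key
    let kn := pvLoop25 (pvHornerA key)
    pvLoopA K' (pvRebuildA kn)
  else K
termination_by 52 - K.length
decreasing_by simp [pvExtractA_length]; omega

def get_long_key (key : String) : List Int :=
  -- key[:16] on a string of length ≥ 16 is take 16 (exact)
  (pvLoopA [] ((pvPadA key.toList).take 16)).take 52

-- ===== PORT B =====

-- (key + " " * 16)[:16]
def pvPadB (cs : List Char) : List Char := (cs ++ List.replicate 16 ' ').take 16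

-- [ord(key[2*j])*256 + ord(key[2*j+1]) for j in range(8)]  (indices always in range)
def pvPairsB (cs : List Char) : List Int :=
  (List.range 8).map (fun j =>
    ((PySem.List.pyGetD cs ((2 * j : Nat) : Int) ' ').toNat : Int) * 256
      + ((PySem.List.pyGetD cs ((2 * j + 1 : Nat) : Int) ' ').toNat : Int))

-- kn = 0; for ch in key: kn = kn*256 + ord(ch)
def pvHornerB (cs : List Char) : Int :=
  cs.foldl (fun kn c => kn * 256 + (c.toNat : Int)) 0

-- kn = ((kn << 25) & ((1 << 128) - 1)) + (kn >> 103)   (exact for the nonneg kn here)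
def pvRotB (kn : Int) : Int :=
  PySem.Int.mod (kn * 2 ^ 25) (2 ^ 128) + PySem.Int.floordiv kn (2 ^ 103)

-- [(kn >> (112 - 16*j)) & 0xFFFF for j in range(8)]
def pvChunksB (kn : Int) : List Int :=
  (List.range 8).map (fun j =>
    PySem.Int.mod (PySem.Int.floordiv kn (2 ^ (112 - 16 * j))) (2 ^ 16))

def get_long_key_alt (key : String) : List Int :=
  let cs := pvPadB key.toList
  let K := pvPairsB cs
  let kn := pvHornerB cs
  let st := (List.range 6).foldl
      (fun (st : Int × List Int) _ =>
        let kn := pvRotB st.1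
        (kn, st.2 ++ pvChunksB kn)) (kn, K)
  st.2.take 52

-- ===== PRECONDITION & SPEC =====
def Spec_get_long_key (key : String) (out : List Int) : Prop := out = get_long_key_alt key
instance (key : String) (out : List Int) : Decidable (Spec_get_long_key key out) := by unfold Spec_get_long_key; infer_instance

-- ===== CLAIM (what is proved, stated in full; the proofs are below) =====
def Claim_equal_get_long_key : Prop := ∀ (key : String), Dom_get_long_key key → Spec_get_long_key key (get_long_key key)

-- ===== LEMMAS AND PROOFS =====

theorem pv_pyRange_1_17 : PySem.List.pyRange 1 17 1 = [1,2,3,4,5,6,7,8,9,10,11,12,13,14,15,16] := by decide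

theorem pv_pyRange_0_16_2 : PySem.List.pyRange 0 16 2 = [0,2,4,6,8,10,12,14] := by decide

-- one byte-recombination step: peeling 8 more bits off kn
theorem pv_step (kn : Int) (m : Nat) :
    kn / 2 ^ (m + 8) * 256 + kn / 2 ^ m % 256 = kn / 2 ^ m := by
  have h : kn / 2 ^ (m + 8) = kn / 2 ^ m / 256 := by
    rw [pow_add, ← Int.ediv_ediv_of_nonneg (by positivity)]; norm_num
  omega

-- two adjacent bytes of kn form one 16-bit chunk
theorem pv_chunk (kn : Int) (m : Nat) :
    kn / 2 ^ (m + 8) % 256 * 256 + kn / 2 ^ m % 256 = kn / 2 ^ m % 2 ^ 16 := by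
  have h : kn / 2 ^ (m + 8) = kn / 2 ^ m / 256 := by
    rw [pow_add, ← Int.ediv_ediv_of_nonneg (by positivity)]; norm_num
  omega

theorem pv_chr_ord (x : Int) (h0 : 0 ≤ x) (h1 : x < 256) :
    ((Char.ofNat x.toNat).toNat : Int) = x := by
  have hx : x.toNat < 256 := by omega
  simp [Char.toNat_ofNat, Nat.isValidChar]
  omega

theorem pvPadA_eq (cs : List Char) :
    pvPadA cs = cs ++ List.replicate (16 - cs.length) ' ' := by
  fun_induction pvPadA cs with
  | case1 cs h ih =>
      rw [ih]
      have h16 : 16 - cs.length = (16 - (cs ++ [' ']).length) + 1 := by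
        simp [List.length_append]; omega
      rw [h16, List.replicate_succ]
      simp
  | case2 cs h =>
      have h16 : 16 - cs.length = 0 := by omega
      simp [h16]

theorem pv_pad_eq (cs : List Char) : (pvPadA cs).take 16 = pvPadB cs := by
  rw [pvPadA_eq]
  simp only [pvPadB, List.take_append, List.take_replicate]
  congr 2
  omega

theorem pvPadB_length (cs : List Char) : (pvPadB cs).length = 16 := by
  simp [pvPadB]

theorem pvPadB_bytes (key : String) (h : Dom_get_long_key key) :
    ∀ c ∈ pvPadB key.toList, c.toNat < 256 := by
  intro c hc
  have hc' := List.mem_of_mem_take hc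
  rcases List.mem_append.mp hc' with h1 | h2
  · have := (List.all_eq_true.mp h) c h1
    simp [pvDomChar] at this
    omega
  · have := List.eq_of_mem_replicate h2
    subst this
    decide

theorem pv_horner_bound (cs : List Char) :
    ∀ (a : Int), (∀ c ∈ cs, c.toNat < 256) → 0 ≤ a →
      0 ≤ cs.foldl (fun kn c => kn * 256 + (c.toNat : Int)) a ∧
      cs.foldl (fun kn c => kn * 256 + (c.toNat : Int)) a < (a + 1) * 256 ^ cs.length := by
  induction cs with
  | nil => intro a _ ha; simp; omega
  | cons c cs ih =>
      intro a hc ha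
      simp only [List.foldl_cons, List.length_cons]
      have hc0 : c.toNat < 256 := hc c List.mem_cons_self
      have ha' : (0:Int) ≤ a * 256 + (c.toNat : Int) := by positivity
      obtain ⟨ih1, ih2⟩ := ih (a * 256 + (c.toNat : Int)) (fun d hd => hc d (List.mem_cons_of_mem _ hd)) ha'
      refine ⟨ih1, lt_of_lt_of_le ih2 ?_⟩
      have h1 : a * 256 + (c.toNat : Int) + 1 ≤ (a + 1) * 256 := by omega
      calc (a * 256 + (c.toNat : Int) + 1) * 256 ^ cs.length
          ≤ (a + 1) * 256 * 256 ^ cs.length :=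
            mul_le_mul_of_nonneg_right h1 (by positivity)
        _ = (a + 1) * 256 ^ (cs.length + 1) := by ring

theorem pvHornerA_eq (cs : List Char) : pvHornerA cs = pvHornerB cs := by
  simp only [pvHornerA, pvHornerB, show (2:Int) ^ 8 = 256 from by norm_num]

theorem pvHornerB_bounds (cs : List Char) (hlen : cs.length = 16)
    (hc : ∀ c ∈ cs, c.toNat < 256) : 0 ≤ pvHornerB cs ∧ pvHornerB cs < 2 ^ 128 := by
  have := pv_horner_bound cs 0 hc le_rfl
  rw [hlen] at this
  norm_num at this
  exact ⟨this.1, this.2⟩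

theorem pvLoop25_eq (kn : Int) : pvLoop25 kn = pvRotB kn := rfl

theorem pvRotB_bounds (kn : Int) (h0 : 0 ≤ kn) (h1 : kn < 2 ^ 128) :
    0 ≤ pvRotB kn ∧ pvRotB kn < 2 ^ 128 := by
  unfold pvRotB
  rw [PySem.Int.mod_eq_emod_of_pos (by norm_num),
      PySem.Int.floordiv_eq_ediv_of_pos (by norm_num)]
  constructor <;> omega

theorem pv_ord_chr_emod (a : Int) :
    ((Char.ofNat (a % 256).toNat).toNat : Int) = a % 256 :=
  pv_chr_ord _ (Int.emod_nonneg a (by norm_num)) (by omega)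

theorem pv_horner_rebuild (kn : Int) (h0 : 0 ≤ kn) (h1 : kn < 2 ^ 128) :
    pvHornerA (pvRebuildA kn) = kn := by
  simp only [pvRebuildA, pv_pyRange_1_17, List.foldl_cons, List.foldl_nil, List.nil_append,
    List.append_assoc, List.singleton_append, pvHornerA]
  norm_num
  simp only [Int.reduceToNat, pv_ord_chr_emod]
  have h120 : kn / 2 ^ 120 % 256 = kn / 2 ^ 120 := by omega
  have e112 : kn / 2 ^ 120 * 256 + kn / 2 ^ 112 % 256 = kn / 2 ^ 112 := pv_step kn 112
  have e104 : kn / 2 ^ 112 * 256 + kn / 2 ^ 104 % 256 = kn / 2 ^ 104 := pv_step kn 104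
  have e96 : kn / 2 ^ 104 * 256 + kn / 2 ^ 96 % 256 = kn / 2 ^ 96 := pv_step kn 96
  have e88 : kn / 2 ^ 96 * 256 + kn / 2 ^ 88 % 256 = kn / 2 ^ 88 := pv_step kn 88
  have e80 : kn / 2 ^ 88 * 256 + kn / 2 ^ 80 % 256 = kn / 2 ^ 80 := pv_step kn 80
  have e72 : kn / 2 ^ 80 * 256 + kn / 2 ^ 72 % 256 = kn / 2 ^ 72 := pv_step kn 72
  have e64 : kn / 2 ^ 72 * 256 + kn / 2 ^ 64 % 256 = kn / 2 ^ 64 := pv_step kn 64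
  have e56 : kn / 2 ^ 64 * 256 + kn / 2 ^ 56 % 256 = kn / 2 ^ 56 := pv_step kn 56
  have e48 : kn / 2 ^ 56 * 256 + kn / 2 ^ 48 % 256 = kn / 2 ^ 48 := pv_step kn 48
  have e40 : kn / 2 ^ 48 * 256 + kn / 2 ^ 40 % 256 = kn / 2 ^ 40 := pv_step kn 40
  have e32 : kn / 2 ^ 40 * 256 + kn / 2 ^ 32 % 256 = kn / 2 ^ 32 := pv_step kn 32
  have e24 : kn / 2 ^ 32 * 256 + kn / 2 ^ 24 % 256 = kn / 2 ^ 24 := pv_step kn 24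
  have e16 : kn / 2 ^ 24 * 256 + kn / 2 ^ 16 % 256 = kn / 2 ^ 16 := pv_step kn 16
  have e8 : kn / 2 ^ 16 * 256 + kn / 2 ^ 8 % 256 = kn / 2 ^ 8 := pv_step kn 8
  have e0 : kn / 2 ^ 8 * 256 + kn % 256 = kn := by omega
  rw [h120, e112, e104, e96, e88, e80, e72, e64, e56, e48, e40, e32, e24, e16, e8, e0]

theorem pv_pairs_rebuild (kn : Int) (h0 : 0 ≤ kn) (h1 : kn < 2 ^ 128) :
    pvPairsB (pvRebuildA kn) = pvChunksB kn := by
  simp only [pvRebuildA, pv_pyRange_1_17, List.foldl_cons, List.foldl_nil, List.nil_append,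
    List.singleton_append, List.append_assoc]
  norm_num
  simp [pvPairsB, pvChunksB, List.range_succ, PySem.List.pyGetD, pv_ord_chr_emod]
  refine ⟨?_, ?_, ?_, ?_, ?_, ?_, ?_, ?_⟩
  · have := pv_chunk kn 112; norm_num at this; exact this
  · have := pv_chunk kn 96; norm_num at this; exact this
  · have := pv_chunk kn 80; norm_num at this; exact this
  · have := pv_chunk kn 64; norm_num at this; exact this
  · have := pv_chunk kn 48; norm_num at this; exact this
  · have := pv_chunk kn 32; norm_num at this; exact this
  · have := pv_chunk kn 16; norm_num at this; exact this
  · have := pv_chunk kn 0; norm_num at this; exact this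

theorem pvExtractA_eq (K : List Int) (cs : List Char) :
    pvExtractA K cs = K ++ pvPairsB cs := by
  simp [pvExtractA, pvPairsB, pv_pyRange_0_16_2, List.foldl_cons, List.range_succ,
    show (2:Int) ^ 8 = 256 from by norm_num]

theorem pvPairsB_length (cs : List Char) : (pvPairsB cs).length = 8 := by
  simp [pvPairsB]

theorem pvChunksB_length (kn : Int) : (pvChunksB kn).length = 8 := by
  simp [pvChunksB]

theorem pv_round (K : List Int) (kn : Int) (h0 : 0 ≤ kn) (h1 : kn < 2 ^ 128)
    (hlt : K.length < 52) :
    pvLoopA K (pvRebuildA kn) = pvLoopA (K ++ pvChunksB kn) (pvRebuildA (pvRotB kn)) := by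
  rw [pvLoopA, if_pos hlt, pvExtractA_eq, pv_pairs_rebuild kn h0 h1,
    pv_horner_rebuild kn h0 h1, pvLoop25_eq]

theorem pv_main (key : String) (h : Dom_get_long_key key) :
    get_long_key key = get_long_key_alt key := by
  have hc := pvPadB_bytes key h
  have hlen := pvPadB_length key.toList
  obtain ⟨hk0, hk1⟩ := pvHornerB_bounds _ hlen hc
  set cs := pvPadB key.toList with hcs
  set k0 := pvHornerB cs with hk
  have b1 := pvRotB_bounds k0 hk0 hk1
  have b2 := pvRotB_bounds _ b1.1 b1.2
  have b3 := pvRotB_bounds _ b2.1 b2.2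
  have b4 := pvRotB_bounds _ b3.1 b3.2
  have b5 := pvRotB_bounds _ b4.1 b4.2
  have b6 := pvRotB_bounds _ b5.1 b5.2
  have hA : get_long_key key =
      (pvPairsB cs ++ pvChunksB (pvRotB k0) ++ pvChunksB (pvRotB (pvRotB k0))
        ++ pvChunksB (pvRotB (pvRotB (pvRotB k0)))
        ++ pvChunksB (pvRotB (pvRotB (pvRotB (pvRotB k0))))
        ++ pvChunksB (pvRotB (pvRotB (pvRotB (pvRotB (pvRotB k0)))))
        ++ pvChunksB (pvRotB (pvRotB (pvRotB (pvRotB (pvRotB (pvRotB k0))))))).take 52 := by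
    unfold get_long_key
    rw [pv_pad_eq, ← hcs]
    rw [pvLoopA, if_pos (by simp), pvExtractA_eq, List.nil_append, pvHornerA_eq, ← hk, pvLoop25_eq]
    rw [pv_round _ _ b1.1 b1.2 (by simp [pvPairsB_length]),
        pv_round _ _ b2.1 b2.2 (by simp [pvPairsB_length, pvChunksB_length]),
        pv_round _ _ b3.1 b3.2 (by simp [pvPairsB_length, pvChunksB_length]),
        pv_round _ _ b4.1 b4.2 (by simp [pvPairsB_length, pvChunksB_length]),
        pv_round _ _ b5.1 b5.2 (by simp [pvPairsB_length, pvChunksB_length]),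
        pv_round _ _ b6.1 b6.2 (by simp [pvPairsB_length, pvChunksB_length])]
    rw [pvLoopA, if_neg (by simp [pvPairsB_length, pvChunksB_length])]
  rw [hA]
  unfold get_long_key_alt
  simp only [← hcs, ← hk, List.range_succ, List.foldl_append, List.foldl_cons, List.foldl_nil,
    List.range_zero, List.append_assoc]

-- ===== VERDICT (by name: the statement is the Claim_ definition above) =====
theorem get_long_key_spec : Claim_equal_get_long_key := by
  intro key h
  exact pv_main key h
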